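-- pv_equiv track=rewrite | github.com/MinwooJe/Algorithm | 프로그래머스/2/17686. ［3차］ 파일명 정렬/［3차］ 파일명 정렬.py | split_file_name
-- ===== SOURCE A (Python) =====
-- def split_file_name(file):
--     head, num, tail = '', '', ''
--     for i in range(len(file)):
--         if file[i].isdigit() and len(file) > (i+1)and not file[i+1].isdigit():   # tail 검사
--             num += file[i]
--             tail = file[i+1:]
--             break
--         elif not file[i].isdigit():     # head 검사
--             head += file[i]
--         elif file[i].isdigit():         # number 검사
--             num += file[i]
--     return [head, num, tail]
-- ===== SOURCE B (Python) =====
-- def split_file_name(file):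
--     n = len(file)
--     i = 0
--     while i < n and not file[i].isdigit():
--         i += 1
--     j = i
--     while j < n and file[j].isdigit():
--         j += 1
--     return [file[:i], file[i:j], file[j:]]
-- ===== Notes on version B (the rewrite author's own statement) =====
-- stated objective: faster
-- what changed: B replaces A's accumulate-per-char loop with lookahead/break by two index scans (end of the leading non-digit prefix, end of the digit run) followed by three slices, avoiding per-character string concatenation.
import Mathlib
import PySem

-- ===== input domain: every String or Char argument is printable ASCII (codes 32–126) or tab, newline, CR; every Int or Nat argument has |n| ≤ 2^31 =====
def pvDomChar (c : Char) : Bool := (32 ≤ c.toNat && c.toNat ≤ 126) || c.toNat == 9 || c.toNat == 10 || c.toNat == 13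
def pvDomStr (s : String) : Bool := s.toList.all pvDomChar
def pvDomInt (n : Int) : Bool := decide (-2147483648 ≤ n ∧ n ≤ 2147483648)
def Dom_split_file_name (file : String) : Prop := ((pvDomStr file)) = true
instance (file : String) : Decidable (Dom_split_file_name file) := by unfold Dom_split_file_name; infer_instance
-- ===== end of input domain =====

-- B replaces A's accumulate-per-char loop (with lookahead break) by two index scans and three slices.
-- Both ports work on file.toList; PySem.Chars.isdigit is exact for str.isdigit on the ASCII domain.

-- ===== PORT A =====
-- A's index loop with lookahead file[i+1] and slice file[i+1:], transliterated as structural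
-- recursion over the character list: at c :: rest, file[i] = c, len(file) > i+1 ↔ rest ≠ [],
-- file[i+1] = rest.head, file[i+1:] = rest; the three accumulators head/num/tail are the state.
def splitLoopA : List Char → List Char → List Char → List Char × List Char × List Char
  | [], head, num => (head, num, [])
  | c :: rest, head, num =>
    if PySem.Chars.isdigit c &&
       (match rest with | [] => false | r :: _ => !PySem.Chars.isdigit r) then
      (head, num ++ [c], rest)            -- num += file[i]; tail = file[i+1:]; break
    else if !PySem.Chars.isdigit c then
      splitLoopA rest (head ++ [c]) num   -- head += file[i]
    else
      splitLoopA rest head (num ++ [c])   -- num += file[i]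

def split_file_name (file : String) : List String :=
  let r := splitLoopA file.toList [] []
  [String.ofList r.1, String.ofList r.2.1, String.ofList r.2.2]

-- ===== PORT B =====
-- B's first while loop: advance i while file[i] is not a digit.
def scanNonDigit : List Char → Nat
  | [] => 0
  | c :: rest => if !PySem.Chars.isdigit c then 1 + scanNonDigit rest else 0

-- B's second while loop: advance j while file[j] is a digit (started at position i).
def scanDigit : List Char → Nat
  | [] => 0
  | c :: rest => if PySem.Chars.isdigit c then 1 + scanDigit rest else 0

def split_file_name_alt (file : String) : List String :=
  let cs := file.toList
  let i := scanNonDigit cs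
  let j := i + scanDigit (cs.drop i)
  [String.ofList (cs.take i), String.ofList ((cs.drop i).take (j - i)), String.ofList (cs.drop j)]

-- ===== PRECONDITION & SPEC =====
def Spec_split_file_name (file : String) (out : List String) : Prop := out = split_file_name_alt file
instance (file : String) (out : List String) : Decidable (Spec_split_file_name file out) := by unfold Spec_split_file_name; infer_instance

-- ===== CLAIM (what is proved, stated in full; the proofs are below) =====
def Claim_equal_split_file_name : Prop := ∀ (file : String), Dom_split_file_name file → Spec_split_file_name file (split_file_name file)

-- ===== LEMMAS AND PROOFS =====

lemma scanNonDigit_eq (cs : List Char) :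
    scanNonDigit cs = (cs.takeWhile (fun c => !PySem.Chars.isdigit c)).length := by
  induction cs with
  | nil => rfl
  | cons c rest ih =>
    simp only [scanNonDigit, List.takeWhile]
    by_cases h : PySem.Chars.isdigit c <;> simp [h, ih, Nat.add_comm]

lemma scanDigit_eq (cs : List Char) :
    scanDigit cs = (cs.takeWhile (fun c => PySem.Chars.isdigit c)).length := by
  induction cs with
  | nil => rfl
  | cons c rest ih =>
    simp only [scanDigit, List.takeWhile]
    by_cases h : PySem.Chars.isdigit c <;> simp [h, ih, Nat.add_comm]

lemma take_takeWhile_length (p : Char → Bool) (cs : List Char) :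
    cs.take (cs.takeWhile p).length = cs.takeWhile p := by
  induction cs with
  | nil => rfl
  | cons c rest ih =>
    by_cases h : p c <;> simp [List.takeWhile, h, ih]

lemma drop_takeWhile_length (p : Char → Bool) (cs : List Char) :
    cs.drop (cs.takeWhile p).length = cs.dropWhile p := by
  induction cs with
  | nil => rfl
  | cons c rest ih =>
    by_cases h : p c <;> simp [List.takeWhile, List.dropWhile, h, ih]

/-- Characterisation of A's loop: regardless of the accumulators, it appends the
leading non-digit run to `head`, the following digit run to `num`, and returns the rest. -/
lemma splitLoopA_eq (cs head num : List Char) :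
    splitLoopA cs head num =
      (head ++ cs.takeWhile (fun c => !PySem.Chars.isdigit c),
       num ++ (cs.dropWhile (fun c => !PySem.Chars.isdigit c)).takeWhile
                (fun c => PySem.Chars.isdigit c),
       (cs.dropWhile (fun c => !PySem.Chars.isdigit c)).dropWhile
                (fun c => PySem.Chars.isdigit c)) := by
  induction cs generalizing head num with
  | nil => simp [splitLoopA]
  | cons c rest ih =>
    by_cases hc : PySem.Chars.isdigit c
    · cases rest with
      | nil => simp [splitLoopA, hc, List.takeWhile, List.dropWhile]
      | cons r rest' =>
        by_cases hr : PySem.Chars.isdigit r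
        · conv_lhs => rw [splitLoopA]
          simp only [hc, hr, Bool.not_true, Bool.and_false, Bool.false_eq_true,
            if_false]
          rw [ih]
          simp [List.takeWhile, List.dropWhile, hc, hr]
        · simp [splitLoopA, hc, hr, List.takeWhile, List.dropWhile]
    · simp [splitLoopA, hc, ih, List.takeWhile, List.dropWhile]

-- ===== VERDICT (by name: the statement is the Claim_ definition above) =====
theorem split_file_name_spec : Claim_equal_split_file_name := by
  intro file _
  unfold Spec_split_file_name split_file_name split_file_name_alt
  simp only [splitLoopA_eq, List.nil_append, scanNonDigit_eq,
    take_takeWhile_length, drop_takeWhile_length, scanDigit_eq]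
  have h1 := take_takeWhile_length (fun c => PySem.Chars.isdigit c)
      (file.toList.dropWhile (fun c => !PySem.Chars.isdigit c))
  have h2 := drop_takeWhile_length (fun c => PySem.Chars.isdigit c)
      (file.toList.dropWhile (fun c => !PySem.Chars.isdigit c))
  rw [Nat.add_sub_cancel_left, h1, ← List.drop_drop, drop_takeWhile_length, h2]
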